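-- pv_equiv track=rewrite | github.com/metazen11/agentmz | tests/test_chat_ui.py | _pick_test_model
-- ===== SOURCE A (Python) =====
-- def _pick_test_model(models, current):
--     preferred_markers = ["0.6b", "1.7b", "3b", "4b", "7b", "8b", "14b"]
--     ordered = sorted(models)
--     for marker in preferred_markers:
--         for model in ordered:
--             if marker in model and model != current:
--                 return model
--     for model in ordered:
--         if model != current:
--             return model
--     return ordered[0] if ordered else current
-- ===== SOURCE B (Python) =====
-- def _pick_test_model(models, current):
--     markers = ["0.6b", "1.7b", "3b", "4b", "7b", "8b", "14b"]
--     ordered = sorted(models)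
--     candidates = [m for m in ordered if m != current]
--     if candidates:
--         def rank(m):
--             return next((i for i, mk in enumerate(markers) if mk in m), len(markers))
--         return min(candidates, key=lambda m: (rank(m), m))
--     return ordered[0] if ordered else current
-- ===== Notes on version B (the rewrite author's own statement) =====
-- stated objective: simpler
-- what changed: Replaces A's nested marker-by-marker early-return scan (plus a separate fallback loop) with a single min-over-key selection: each candidate gets a rank (index of the first preferred marker it contains, or len(markers) if none) and the result is min(candidates, key=(rank, name)).
import Mathlib
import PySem

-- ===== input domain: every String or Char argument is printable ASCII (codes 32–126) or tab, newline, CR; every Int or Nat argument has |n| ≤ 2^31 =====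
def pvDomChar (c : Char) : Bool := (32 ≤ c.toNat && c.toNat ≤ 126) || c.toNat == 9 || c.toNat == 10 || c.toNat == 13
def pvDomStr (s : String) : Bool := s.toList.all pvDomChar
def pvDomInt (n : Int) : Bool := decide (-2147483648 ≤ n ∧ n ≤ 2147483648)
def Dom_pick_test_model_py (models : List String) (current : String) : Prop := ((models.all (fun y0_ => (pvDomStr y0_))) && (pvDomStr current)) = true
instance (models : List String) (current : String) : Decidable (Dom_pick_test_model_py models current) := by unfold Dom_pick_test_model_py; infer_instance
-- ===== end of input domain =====

-- B replaces A's nested marker×model early-return scan by one min-over-key selection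
-- (key = first-marker rank, then string); objective: simpler. Equal return value on all inputs.

-- ===== PORT A =====
-- 'for marker in preferred_markers: for model in ordered: if marker in model and model != current: return model'
def pvA_scan (markers : List String) (ordered : List String) (current : String) : Option String :=
  match markers with
  | [] => none
  | mk :: rest =>
    match ordered.find? (fun m => PySem.Str.isIn mk m && m != current) with
    | some m => some m
    | none => pvA_scan rest ordered current

def pick_test_model_py (models : List String) (current : String) : String :=
  let preferred_markers := ["0.6b", "1.7b", "3b", "4b", "7b", "8b", "14b"]
  let ordered := PySem.List.sorted models (fun x => x) false
  match pvA_scan preferred_markers ordered current with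
  | some m => m
  | none =>
    match ordered.find? (fun m => m != current) with
    | some m => m
    | none => match ordered with | [] => current | m :: _ => m

-- ===== PORT B =====
-- rank(m) = next((i for i, mk in enumerate(markers) if mk in m), len(markers))
def pvB_rank (markers : List String) (m : String) : Int :=
  match (PySem.List.enumerate markers 0).find? (fun p => PySem.Str.isIn p.2 m) with
  | some p => p.1
  | none => (markers.length : Int)

-- min(candidates, key=lambda m: (rank(m), m)) : Python min keeps the FIRST extremal element
def pvB_minBy (markers : List String) (c : String) (cs : List String) : String :=
  cs.foldl (fun best m =>
    if pvB_rank markers m < pvB_rank markers best ∨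
       (pvB_rank markers m = pvB_rank markers best ∧ m < best) then m else best) c

def pick_test_model_py_alt (models : List String) (current : String) : String :=
  let markers := ["0.6b", "1.7b", "3b", "4b", "7b", "8b", "14b"]
  let ordered := PySem.List.sorted models (fun x => x) false
  let candidates := ordered.filter (fun m => m != current)
  match candidates with
  | [] => match ordered with | [] => current | m :: _ => m
  | c :: cs => pvB_minBy markers c cs

-- ===== PRECONDITION & SPEC =====
def Spec_pick_test_model_py (models : List String) (current : String) (out : String) : Prop := out = pick_test_model_py_alt models current
instance (models : List String) (current : String) (out : String) : Decidable (Spec_pick_test_model_py models current out) := by unfold Spec_pick_test_model_py; infer_instance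

-- ===== CLAIM (what is proved, stated in full; the proofs are below) =====
def Claim_equal_pick_test_model_py : Prop := ∀ (models : List String) (current : String), Dom_pick_test_model_py models current → Spec_pick_test_model_py models current (pick_test_model_py models current)

-- ===== LEMMAS AND PROOFS =====

-- recursive characterisation of pvB_rank
def pvRank : List String → String → Int
  | [], _ => 0
  | mk :: rest, m => if PySem.Str.isIn mk m then 0 else pvRank rest m + 1

theorem pvRank_nonneg (ms : List String) (m : String) : 0 ≤ pvRank ms m := by
  induction ms with
  | nil => simp [pvRank]
  | cons mk rest ih => simp only [pvRank]; split <;> omega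

theorem pvRank_le (ms : List String) (m : String) : pvRank ms m ≤ (ms.length : Int) := by
  induction ms with
  | nil => simp [pvRank]
  | cons mk rest ih =>
    simp only [pvRank, List.length_cons]
    split <;> push_cast <;> omega

theorem pvB_rank_eq (ms : List String) (m : String) : pvB_rank ms m = pvRank ms m := by
  have key : ∀ (ms : List String) (s : Int),
      ((PySem.List.enumerate ms s).find? (fun p => PySem.Str.isIn p.2 m)).map Prod.fst
        = if pvRank ms m = (ms.length : Int) then none else some (s + pvRank ms m) := by
    intro ms
    induction ms with
    | nil => intro s; simp [PySem.List.enumerate_nil, pvRank]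
    | cons mk rest ih =>
      intro s
      rw [PySem.List.enumerate_cons]
      by_cases h : PySem.Str.isIn mk m = true
      · rw [List.find?_cons_of_pos (by simpa using h)]
        have hne : ¬ (pvRank (mk :: rest) m = ((mk :: rest).length : Int)) := by
          simp only [pvRank, h, if_true, List.length_cons]
          push_cast
          have := pvRank_le rest m
          omega
        rw [if_neg hne]
        have h2 : pvRank (mk :: rest) m = 0 := by simp only [pvRank, h, if_true]
        simp [h2]
      · have h' : PySem.Str.isIn mk m = false := by simpa using h
        rw [List.find?_cons_of_neg (by simpa using h)]
        rw [ih (s + 1)]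
        have hle := pvRank_le rest m
        simp only [pvRank, h', Bool.false_eq_true, if_false, List.length_cons]
        by_cases hc : pvRank rest m = (rest.length : Int)
        · rw [if_pos hc, if_pos (by push_cast; omega)]
        · rw [if_neg hc, if_neg (by push_cast; exact fun hco => hc (by omega))]
          congr 1
          omega
  have h0 := key ms 0
  unfold pvB_rank
  cases hfind : (PySem.List.enumerate ms 0).find? (fun p => PySem.Str.isIn p.2 m) with
  | none =>
    rw [hfind] at h0
    simp at h0
    simp [h0]
  | some p =>
    rw [hfind] at h0
    simp at h0
    simpa using h0.2

-- the lexicographic key order (rank, string)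
def pvKeyLE (ms : List String) (a b : String) : Prop :=
  pvRank ms a < pvRank ms b ∨ (pvRank ms a = pvRank ms b ∧ a ≤ b)

theorem pvKeyLE_refl (ms : List String) (a : String) : pvKeyLE ms a a := Or.inr ⟨rfl, le_refl a⟩

theorem pvKeyLE_trans {ms : List String} {a b c : String}
    (h1 : pvKeyLE ms a b) (h2 : pvKeyLE ms b c) : pvKeyLE ms a c := by
  rcases h1 with h1 | ⟨e1, l1⟩ <;> rcases h2 with h2 | ⟨e2, l2⟩
  · exact Or.inl (lt_trans h1 h2)
  · exact Or.inl (by omega)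
  · exact Or.inl (by omega)
  · exact Or.inr ⟨by omega, le_trans l1 l2⟩

theorem pvKeyLE_antisymm {ms : List String} {a b : String}
    (h1 : pvKeyLE ms a b) (h2 : pvKeyLE ms b a) : a = b := by
  rcases h1 with h1 | ⟨e1, l1⟩ <;> rcases h2 with h2 | ⟨e2, l2⟩
  all_goals first
    | omega
    | exact le_antisymm l1 l2

-- B's fold returns an element of the list whose key is ≤ every key
theorem pvB_minBy_spec (ms : List String) :
    ∀ (cs : List String) (c : String),
      pvB_minBy ms c cs ∈ c :: cs ∧ ∀ x ∈ c :: cs, pvKeyLE ms (pvB_minBy ms c cs) x := by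
  intro cs
  induction cs with
  | nil =>
    intro c
    constructor
    · simp [pvB_minBy]
    · intro x hx; simp at hx; subst hx; simp [pvB_minBy, pvKeyLE_refl]
  | cons m rest ih =>
    intro c
    by_cases hlt : pvB_rank ms m < pvB_rank ms c ∨ (pvB_rank ms m = pvB_rank ms c ∧ m < c)
    · have step : pvB_minBy ms c (m :: rest) = pvB_minBy ms m rest := by
        simp only [pvB_minBy, List.foldl_cons]
        rw [if_pos hlt]
      have hmc : pvKeyLE ms m c := by
        rw [pvB_rank_eq, pvB_rank_eq] at hlt
        rcases hlt with h | ⟨e, l⟩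
        · exact Or.inl h
        · exact Or.inr ⟨e, le_of_lt l⟩
      obtain ⟨hmem, hmin⟩ := ih m
      have hkm : pvKeyLE ms (pvB_minBy ms m rest) m := hmin m (List.mem_cons_self)
      refine ⟨?_, ?_⟩
      · rw [step]
        rcases List.mem_cons.mp hmem with h | h
        · rw [h]; exact List.mem_cons_of_mem c (List.mem_cons_self)
        · exact List.mem_cons_of_mem c (List.mem_cons_of_mem m h)
      · intro x hx
        rw [step]
        rcases List.mem_cons.mp hx with h | hx
        · rw [h]; exact pvKeyLE_trans hkm hmc
        · rcases List.mem_cons.mp hx with h | hx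
          · rw [h]; exact hkm
          · exact hmin x (List.mem_cons_of_mem m hx)
    · have step : pvB_minBy ms c (m :: rest) = pvB_minBy ms c rest := by
        simp only [pvB_minBy, List.foldl_cons]
        rw [if_neg hlt]
      have hcm : pvKeyLE ms c m := by
        rw [pvB_rank_eq, pvB_rank_eq] at hlt
        rcases lt_trichotomy (pvRank ms c) (pvRank ms m) with h | h | h
        · exact Or.inl h
        · refine Or.inr ⟨h, ?_⟩
          by_cases hmc : m < c
          · exact absurd (Or.inr ⟨h.symm, hmc⟩) hlt
          · exact le_of_not_gt hmc
        · exact absurd (Or.inl h) hlt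
      obtain ⟨hmem, hmin⟩ := ih c
      have hkc : pvKeyLE ms (pvB_minBy ms c rest) c := hmin c (List.mem_cons_self)
      refine ⟨?_, ?_⟩
      · rw [step]
        rcases List.mem_cons.mp hmem with h | h
        · rw [h]; exact List.mem_cons_self
        · exact List.mem_cons_of_mem c (List.mem_cons_of_mem m h)
      · intro x hx
        rw [step]
        rcases List.mem_cons.mp hx with h | hx
        · rw [h]; exact hkc
        · rcases List.mem_cons.mp hx with h | hx
          · rw [h]; exact pvKeyLE_trans hkc hcm
          · exact hmin x (List.mem_cons_of_mem c hx)

-- find? through a filter: A tests 'marker in m and m != current' over ordered,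
-- B scans ordered filtered by '!= current'
theorem pv_find?_and_filter {α : Type} (p q : α → Bool) (xs : List α) :
    xs.find? (fun x => p x && q x) = (xs.filter q).find? p := by
  induction xs with
  | nil => rfl
  | cons x rest ih =>
    by_cases hq : q x = true
    · rw [List.filter_cons_of_pos hq]
      by_cases hp : p x = true
      · rw [List.find?_cons_of_pos (by simp [hp, hq]), List.find?_cons_of_pos hp]
      · rw [List.find?_cons_of_neg (by simp [hp]), List.find?_cons_of_neg hp, ih]
    · rw [List.filter_cons_of_neg hq, List.find?_cons_of_neg (by simp [hq]), ih]

-- the second loop of A is head-of-filtered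
theorem pv_find?_eq_head?_filter {α : Type} (p : α → Bool) (xs : List α) :
    xs.find? p = (xs.filter p).head? := by
  induction xs with
  | nil => rfl
  | cons x rest ih =>
    by_cases hp : p x = true
    · rw [List.find?_cons_of_pos hp, List.filter_cons_of_pos hp, List.head?_cons]
    · rw [List.find?_cons_of_neg hp, List.filter_cons_of_neg hp, ih]

-- A's marker scan re-expressed over the filtered candidate list
def pvScanF : List String → List String → Option String
  | [], _ => none
  | mk :: rest, cs =>
    match cs.find? (fun m => PySem.Str.isIn mk m) with
    | some m => some m
    | none => pvScanF rest cs

theorem pvA_scan_eq (markers ordered : List String) (current : String) :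
    pvA_scan markers ordered current = pvScanF markers (ordered.filter (fun m => m != current)) := by
  induction markers with
  | nil => rfl
  | cons mk rest ih =>
    simp only [pvA_scan, pvScanF]
    rw [pv_find?_and_filter (fun m => PySem.Str.isIn mk m) (fun m => m != current) ordered, ih]

-- in a sorted list, the first element satisfying p is ≤ every element satisfying p
theorem pv_find?_min {p : String → Bool} {cs : List String}
    (hs : cs.Pairwise (· ≤ ·)) :
    ∀ r, cs.find? p = some r → ∀ x ∈ cs, p x = true → r ≤ x := by
  induction cs with
  | nil => intro r hf; simp at hf
  | cons c rest ih =>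
    rcases List.pairwise_cons.mp hs with ⟨hhead, htail⟩
    intro r hf
    by_cases hp : p c = true
    · rw [List.find?_cons_of_pos hp] at hf
      injection hf with hf
      intro x hx _
      rcases List.mem_cons.mp hx with h | h
      · rw [← hf, h]
      · rw [← hf]; exact hhead x h
    · rw [List.find?_cons_of_neg hp] at hf
      intro x hx hpx
      rcases List.mem_cons.mp hx with h | h
      · rw [h] at hpx; exact absurd hpx hp
      · exact ih htail r hf x h hpx

-- the scan, when it returns, returns a key-minimal element; when it fails, every rank is maximal
theorem pvScanF_spec (ms : List String) (cs : List String) (hs : cs.Pairwise (· ≤ ·)) :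
    (∀ r, pvScanF ms cs = some r → r ∈ cs ∧ ∀ x ∈ cs, pvKeyLE ms r x) ∧
    (pvScanF ms cs = none → ∀ x ∈ cs, pvRank ms x = (ms.length : Int)) := by
  induction ms with
  | nil =>
    constructor
    · intro r hr; simp [pvScanF] at hr
    · intro _ x _; simp [pvRank]
  | cons mk rest ih =>
    constructor
    · intro r hr
      simp only [pvScanF] at hr
      cases hfind : cs.find? (fun m => PySem.Str.isIn mk m) with
      | some m =>
        rw [hfind] at hr
        injection hr with hr
        have hrmem : m ∈ cs := List.mem_of_find?_eq_some hfind
        have hrp : PySem.Str.isIn mk m = true := by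
          have := List.find?_some hfind; simpa using this
        rw [← hr]
        refine ⟨hrmem, ?_⟩
        intro x hx
        have hrank_r : pvRank (mk :: rest) m = 0 := by
          simp only [pvRank, hrp, if_true]
        by_cases hpx : PySem.Str.isIn mk x = true
        · have hrank_x : pvRank (mk :: rest) x = 0 := by
            simp only [pvRank, hpx, if_true]
          exact Or.inr ⟨by omega, pv_find?_min hs m hfind x hx hpx⟩
        · have hpx' : PySem.Str.isIn mk x = false := by simpa using hpx
          have hrank_x : pvRank (mk :: rest) x = pvRank rest x + 1 := by
            simp only [pvRank, hpx', Bool.false_eq_true, if_false]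
          have := pvRank_nonneg rest x
          exact Or.inl (by omega)
      | none =>
        rw [hfind] at hr
        have hnone : ∀ x ∈ cs, PySem.Str.isIn mk x = false := by
          intro x hx
          have := List.find?_eq_none.mp hfind x hx
          simpa using this
        obtain ⟨hrmem, hrmin⟩ := (ih.1) r hr
        refine ⟨hrmem, ?_⟩
        intro x hx
        have hrx : pvRank (mk :: rest) x = pvRank rest x + 1 := by
          simp only [pvRank, hnone x hx, Bool.false_eq_true, if_false]
        have hrr : pvRank (mk :: rest) r = pvRank rest r + 1 := by
          simp only [pvRank, hnone r hrmem, Bool.false_eq_true, if_false]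
        rcases hrmin x hx with h | ⟨e, l⟩
        · exact Or.inl (by omega)
        · exact Or.inr ⟨by omega, l⟩
    · intro hnone x hx
      simp only [pvScanF] at hnone
      cases hfind : cs.find? (fun m => PySem.Str.isIn mk m) with
      | some m => rw [hfind] at hnone; simp at hnone
      | none =>
        rw [hfind] at hnone
        have hninc : PySem.Str.isIn mk x = false := by
          have := List.find?_eq_none.mp hfind x hx
          simpa using this
        have hlen := (ih.2) hnone x hx
        simp only [pvRank, hninc, Bool.false_eq_true, if_false, List.length_cons]
        push_cast
        omega

theorem pvScanF_nil (ms : List String) : pvScanF ms [] = none := by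
  induction ms with
  | nil => rfl
  | cons mk rest ih => simp [pvScanF, ih]

-- the heart of the equivalence, over an arbitrary 'ordered' list whose candidates are sorted
theorem pv_core (M ordered : List String) (current : String) :
    (ordered.filter (fun m => m != current)).Pairwise (· ≤ ·) →
    (match pvA_scan M ordered current with
      | some m => m
      | none =>
        match ordered.find? (fun m => m != current) with
        | some m => m
        | none => match ordered with | [] => current | m :: _ => m)
      =
    (match ordered.filter (fun m => m != current) with
      | [] => match ordered with | [] => current | m :: _ => m
      | c :: cs' => pvB_minBy M c cs') := by
  intro hs
  rw [pvA_scan_eq M ordered current, pv_find?_eq_head?_filter]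
  cases hc : ordered.filter (fun m => m != current) with
  | nil =>
    rw [pvScanF_nil]
    rfl
  | cons c cs' =>
    rw [hc] at hs
    rcases pvScanF_spec M (c :: cs') hs with ⟨hsome, hnone⟩
    obtain ⟨hbmem, hbmin⟩ := pvB_minBy_spec M cs' c
    cases hscan : pvScanF M (c :: cs') with
    | some r =>
      obtain ⟨hrmem, hrmin⟩ := hsome r hscan
      exact pvKeyLE_antisymm (hrmin _ hbmem) (hbmin r hrmem)
    | none =>
      have hall := hnone hscan
      have hchead : ∀ x ∈ c :: cs', pvKeyLE M c x := by
        intro x hx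
        refine Or.inr ⟨by rw [hall c List.mem_cons_self, hall x hx], ?_⟩
        rcases List.mem_cons.mp hx with h | h
        · rw [h]
        · exact (List.pairwise_cons.mp hs).1 x h
      exact pvKeyLE_antisymm (hchead _ hbmem) (hbmin c List.mem_cons_self)

-- ===== VERDICT (by name: the statement is the Claim_ definition above) =====
theorem pick_test_model_py_spec : Claim_equal_pick_test_model_py := by
  intro models current _
  unfold Spec_pick_test_model_py pick_test_model_py pick_test_model_py_alt
  exact pv_core ["0.6b", "1.7b", "3b", "4b", "7b", "8b", "14b"]
    (PySem.List.sorted models (fun x => x) false) current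
    (List.Pairwise.filter _ (PySem.List.sorted_pairwise models (fun x => x)))
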